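-- pv_equiv track=rewrite | github.com/gbouchar/factorix | factorix/demos/urban/urban_data_loading.py | make_entities_by_type
-- ===== SOURCE A (Python) =====
-- from collections import defaultdict
-- from collections import Counter
--
-- def make_entities_by_type(data):
--     entities_by_type = defaultdict(list)
--     for t, v in data:
--         for typ, ent in t:
--             entities_by_type[typ].append(ent)
--     for k in entities_by_type:
--         entities_by_type[k] = sorted(Counter(entities_by_type[k]).items(), key=lambda x: -x[1])
--     return entities_by_type
-- ===== SOURCE B (Python) =====
-- from collections import defaultdict
--
-- def make_entities_by_type(data):
--     pairs = [p for t, _ in data for p in t]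
--     result = defaultdict(list)
--     for typ, _ in pairs:
--         if typ not in result:
--             ents = [e for t2, e in pairs if t2 == typ]
--             uniq = []
--             for e in ents:
--                 if e not in uniq:
--                     uniq.append(e)
--             result[typ] = sorted(((e, ents.count(e)) for e in uniq), key=lambda x: -x[1])
--     return result
-- ===== Notes on version B (the rewrite author's own statement) =====
-- stated objective: alternative
-- what changed: B drops A's grouping dict and Counter entirely: it flattens the data once and, the first time each type is seen, computes that type's line directly by scanning the flat pair list (filter by type, ordered dedup, list.count per distinct entity) before one stable sort.
import Mathlib
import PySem

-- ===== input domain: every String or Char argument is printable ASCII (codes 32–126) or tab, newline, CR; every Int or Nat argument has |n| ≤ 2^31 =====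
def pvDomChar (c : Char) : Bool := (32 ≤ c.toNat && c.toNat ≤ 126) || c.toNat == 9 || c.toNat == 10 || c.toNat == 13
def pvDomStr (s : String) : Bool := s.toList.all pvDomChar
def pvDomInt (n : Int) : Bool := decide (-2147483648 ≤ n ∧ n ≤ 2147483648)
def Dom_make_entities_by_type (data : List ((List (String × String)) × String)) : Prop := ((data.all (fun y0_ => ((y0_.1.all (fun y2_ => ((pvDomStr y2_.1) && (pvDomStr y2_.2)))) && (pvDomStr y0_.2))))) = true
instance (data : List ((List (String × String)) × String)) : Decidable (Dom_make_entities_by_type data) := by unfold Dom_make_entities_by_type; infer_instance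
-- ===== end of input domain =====

-- B replaces A's grouping dict + per-type Counter with direct nested scans: it flattens the
-- data once and, at each type's first appearance, builds that type's line by filtering the
-- flat pair list, deduplicating in order and counting with list.count — no hash counting.
-- Alternative decomposition, not claimed faster. A returns a defaultdict; the equivalence is
-- about the returned key→value content (as an insertion-ordered association list).

-- ===== PORT A =====
-- entities_by_type[typ].append(ent)
def pyAppendEnt (d : PySem.Dict String (List String)) (p : String × String) : PySem.Dict String (List String) :=
  d.modify p.1 [] (fun l => l ++ [p.2])

def make_entities_by_type (data : List ((List (String × String)) × String)) : List (String × List (String × Int)) :=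
  ((data.foldl (fun d tv => tv.1.foldl pyAppendEnt d) PySem.Dict.empty).items).map
    (fun kv => (kv.1, PySem.List.sorted (PySem.Dict.counter kv.2).items (fun x => -x.2) false))

-- ===== PORT B =====
def make_entities_by_type_alt (data : List ((List (String × String)) × String)) : List (String × List (String × Int)) :=
  let pairs := data.flatMap (fun tv => tv.1)
  (pairs.foldl (fun res p =>
      if res.contains p.1 then res else
        let ents := (pairs.filter (fun q => q.1 == p.1)).map Prod.snd
        let uniq := PySem.Set.ofList ents
        res.insert p.1 (PySem.List.sorted (uniq.map (fun e => (e, (ents.count e : Int)))) (fun x => -x.2) false))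
    PySem.Dict.empty).items

-- ===== PRECONDITION & SPEC =====
def Spec_make_entities_by_type (data : List ((List (String × String)) × String)) (out : List (String × List (String × Int))) : Prop := out = make_entities_by_type_alt data
instance (data : List ((List (String × String)) × String)) (out : List (String × List (String × Int))) : Decidable (Spec_make_entities_by_type data out) := by unfold Spec_make_entities_by_type; infer_instance

-- ===== CLAIM =====
def Claim_equal_make_entities_by_type : Prop := ∀ (data : List ((List (String × String)) × String)), Dom_make_entities_by_type data → Spec_make_entities_by_type data (make_entities_by_type data)

-- ===== LEMMAS AND PROOFS =====

-- the generic "group values by key via modify-append" loop, described by its items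
theorem pv_group_items {β : Type} [BEq β] (l : List (String × β)) :
    (l.foldl (fun d p => d.modify p.1 [] (fun acc => acc ++ [p.2]))
      (PySem.Dict.empty : PySem.Dict String (List β))).items
    = (PySem.Set.ofList (l.map Prod.fst)).map
        (fun k => (k, (l.filter (fun p => p.1 == k)).map Prod.snd)) := by
  have hnd : (l.foldl (fun d p => d.modify p.1 [] (fun acc => acc ++ [p.2]))
      (PySem.Dict.empty : PySem.Dict String (List β))).keys.Nodup := by
    exact PySem.Dict.nodup_keys_foldl_modify_key l Prod.fst []
      (fun d p => (fun acc => acc ++ [p.2])) PySem.Dict.empty (by simp)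
  rw [PySem.Dict.items_eq_map_keys _ hnd []]
  rw [PySem.Dict.keys_foldl_modify_key]
  have hkeys : PySem.Set.update (PySem.Dict.empty : PySem.Dict String (List β)).keys (l.map Prod.fst)
      = PySem.Set.ofList (l.map Prod.fst) := by
    rw [PySem.Dict.keys_empty, PySem.Set.update_nil_left]
  rw [hkeys]
  refine List.map_congr_left ?_
  intro k _
  rw [PySem.Dict.getD_foldl_modify_append, PySem.Dict.getD_empty]
  simp

-- B's first-seen-key loop: folding "insert k (f k) unless k already present" over a list of
-- pairs produces exactly one item (k, f k) per distinct key, in first-appearance order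
theorem pv_first_seen_items {β ν : Type} (f : String → ν) (l : List (String × β)) :
    (l.foldl (fun res p => if res.contains p.1 then res else res.insert p.1 (f p.1))
      (PySem.Dict.empty : PySem.Dict String ν)).items
    = (PySem.Set.ofList (l.map Prod.fst)).map (fun k => (k, f k)) := by
  induction l using List.reverseRecOn with
  | nil => simp [PySem.Set.ofList_nil, PySem.Dict.empty]
  | append_singleton l p ih =>
    rw [List.foldl_append, List.foldl_cons, List.foldl_nil, List.map_append,
        List.map_singleton, PySem.Set.ofList_append_singleton]
    set D := l.foldl (fun res p => if res.contains p.1 then res else res.insert p.1 (f p.1))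
      (PySem.Dict.empty : PySem.Dict String ν) with hD
    have hkeys : D.keys = PySem.Set.ofList (l.map Prod.fst) := by
      have : D.keys = D.items.map Prod.fst := rfl
      rw [this, ih, List.map_map]
      exact List.map_id'' (fun _ => rfl) _
    by_cases hmem : p.1 ∈ (PySem.Set.ofList (l.map Prod.fst) : List String)
    · have hc : D.contains p.1 = true := by
        rw [PySem.Dict.contains_eq_decide_mem_keys, hkeys]
        exact decide_eq_true hmem
      rw [if_pos hc, PySem.Set.add_of_mem hmem, ih]
    · have hc : D.contains p.1 = false := by
        rw [PySem.Dict.contains_eq_decide_mem_keys, hkeys]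
        exact decide_eq_false hmem
      rw [if_neg (by simp [hc]), PySem.Dict.items_insert_of_not_contains _ _ hc, ih,
          PySem.Set.add_of_not_mem hmem, List.map_append, List.map_singleton]

-- ===== VERDICT =====
theorem make_entities_by_type_spec : Claim_equal_make_entities_by_type := by
  intro data _
  unfold Spec_make_entities_by_type make_entities_by_type make_entities_by_type_alt
  set pairs : List (String × String) := data.flatMap (fun tv => tv.1) with hpairs
  rw [show data.foldl (fun d tv => tv.1.foldl pyAppendEnt d) (PySem.Dict.empty : PySem.Dict String (List String))
      = pairs.foldl pyAppendEnt PySem.Dict.empty from (List.foldl_flatMap ..).symm]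
  have hA : (pairs.foldl pyAppendEnt (PySem.Dict.empty : PySem.Dict String (List String))).items
      = (PySem.Set.ofList (pairs.map Prod.fst)).map
          (fun k => (k, (pairs.filter (fun p => p.1 == k)).map Prod.snd)) := pv_group_items pairs
  rw [hA, List.map_map,
      pv_first_seen_items
        (fun k =>
          let ents := (pairs.filter (fun q => q.1 == k)).map Prod.snd
          let uniq := PySem.Set.ofList ents
          PySem.List.sorted (uniq.map (fun e => (e, (ents.count e : Int)))) (fun x => -x.2) false)
        pairs]
  refine List.map_congr_left ?_
  intro k _
  simp only [Function.comp_apply, PySem.Dict.items_counter]
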